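-- pv_equiv track=rewrite | github.com/PolyDataLab/SessionBasedCourseRecommendation | Proposed_Approaches/CBEACON/procedure.py | calculate_term_dict_false
-- ===== SOURCE A (Python) =====
-- def calculate_term_dict_false(term_dict_false, semester, t_basket, pred_basket, reversed_item_dict):
--     for item in pred_basket:
--         if item not in t_basket:
--             if semester not in term_dict_false:
--                 count_course = {}
--             else:
--                 count_course = term_dict_false[semester]
--             if reversed_item_dict[item] not in count_course:
--                 count_course[reversed_item_dict[item]] = 1
--             else:
--                 count_course[reversed_item_dict[item]] = count_course[reversed_item_dict[item]]+ 1
--             term_dict_false[semester] = count_course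
--     return term_dict_false
-- ===== SOURCE B (Python) =====
-- def calculate_term_dict_false(term_dict_false, semester, t_basket, pred_basket, reversed_item_dict):
--     t_set = set(t_basket)
--     wrong = {}
--     for item in pred_basket:
--         if item not in t_set:
--             name = reversed_item_dict[item]
--             wrong[name] = wrong.get(name, 0) + 1
--     if wrong:
--         count_course = term_dict_false.get(semester, {})
--         for name, c in wrong.items():
--             count_course[name] = count_course.get(name, 0) + c
--         term_dict_false[semester] = count_course
--     return term_dict_false
-- ===== Notes on version B (the rewrite author's own statement) =====
-- stated objective: alternative
-- what changed: A re-reads term_dict_false[semester] and reassigns it once per wrong predicted item, bumping the count with an in/else branch; B is a two-phase pass: one loop builds a frequency table of the wrong course names (with a set for the t_basket membership test), then that table is merged into the semester's counts once and assigned once.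
import Mathlib
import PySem

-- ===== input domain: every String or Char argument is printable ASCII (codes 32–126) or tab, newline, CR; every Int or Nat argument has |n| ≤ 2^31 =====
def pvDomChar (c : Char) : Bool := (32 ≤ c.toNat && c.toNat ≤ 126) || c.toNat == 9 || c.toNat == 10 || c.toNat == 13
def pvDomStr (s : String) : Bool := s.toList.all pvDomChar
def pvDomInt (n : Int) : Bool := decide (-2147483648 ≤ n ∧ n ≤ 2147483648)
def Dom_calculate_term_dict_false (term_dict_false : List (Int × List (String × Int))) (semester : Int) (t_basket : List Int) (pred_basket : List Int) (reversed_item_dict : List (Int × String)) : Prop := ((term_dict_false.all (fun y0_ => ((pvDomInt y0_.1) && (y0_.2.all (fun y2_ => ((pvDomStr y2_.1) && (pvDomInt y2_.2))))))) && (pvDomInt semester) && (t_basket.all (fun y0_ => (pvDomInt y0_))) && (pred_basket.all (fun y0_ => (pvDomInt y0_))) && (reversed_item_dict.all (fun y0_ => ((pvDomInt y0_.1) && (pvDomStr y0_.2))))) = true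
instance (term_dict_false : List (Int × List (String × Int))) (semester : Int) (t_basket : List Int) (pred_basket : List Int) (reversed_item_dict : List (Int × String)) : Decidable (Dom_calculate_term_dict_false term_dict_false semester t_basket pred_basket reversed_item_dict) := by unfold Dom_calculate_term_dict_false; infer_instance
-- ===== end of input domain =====

-- B replaces A's interleaved per-item dict rewriting with a two-phase count-then-merge pass
-- (set membership + one frequency table, one final assignment); equivalence is about the RETURN
-- value only: the Python A (and B) also mutate term_dict_false in place.
-- B replaces A's interleaved per-item dict rewriting by a two-phase count-then-merge pass (set
-- membership, one frequency table, one final assignment). Equivalence is about the RETURN value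
-- only: the Python A (and likewise B) also mutates term_dict_false in place.
-- ===== PORT A =====
-- both ports move between the association-list signature and PySem.Dict via this glue
def pvWrap (l : List (Int × List (String × Int))) : PySem.Dict Int (PySem.Dict String Int) :=
  PySem.Dict.mk (l.map (fun p => (p.1, PySem.Dict.mk p.2)))

def pvUnwrap (d : PySem.Dict Int (PySem.Dict String Int)) : List (Int × List (String × Int)) :=
  d.items.map (fun p => (p.1, p.2.items))

def calculate_term_dict_false (term_dict_false : List (Int × List (String × Int))) (semester : Int) (t_basket : List Int) (pred_basket : List Int) (reversed_item_dict : List (Int × String)) : List (Int × List (String × Int)) :=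
  let rid := PySem.Dict.mk reversed_item_dict
  let final := pred_basket.foldl (fun d item =>
    if t_basket.contains item then d
    else
      let count_course := if d.contains semester = false then PySem.Dict.empty
                          else (d.get? semester).getD PySem.Dict.empty
      match rid.get? item with
      | none => d
      | some name =>
        let count_course := if count_course.contains name = false then count_course.insert name 1
                            else count_course.insert name (count_course.getD name 0 + 1)
        d.insert semester count_course) (pvWrap term_dict_false)
  pvUnwrap final

-- ===== PORT B =====
def calculate_term_dict_false_alt (term_dict_false : List (Int × List (String × Int))) (semester : Int) (t_basket : List Int) (pred_basket : List Int) (reversed_item_dict : List (Int × String)) : List (Int × List (String × Int)) :=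
  let rid := PySem.Dict.mk reversed_item_dict
  let t_set : PySem.Set Int := PySem.Set.ofList t_basket
  let wrong : PySem.Dict String Int := pred_basket.foldl (fun w item =>
    if PySem.Set.contains t_set item then w
    else
      let name := (rid.get? item).getD ""
      w.insert name (w.getD name 0 + 1)) PySem.Dict.empty
  if wrong.items = [] then term_dict_false
  else
    let d := pvWrap term_dict_false
    let count_course := (d.get? semester).getD PySem.Dict.empty
    let count_course := wrong.items.foldl (fun cc p => cc.insert p.1 (cc.getD p.1 0 + p.2)) count_course
    pvUnwrap (d.insert semester count_course)

-- ===== PRECONDITION & SPEC =====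
-- Pre_ excludes exactly the inputs where Python A raises KeyError: some predicted item outside
-- t_basket has no entry in reversed_item_dict.
def Pre_calculate_term_dict_false (term_dict_false : List (Int × List (String × Int))) (semester : Int) (t_basket : List Int) (pred_basket : List Int) (reversed_item_dict : List (Int × String)) : Prop :=
  ∀ item ∈ pred_basket, item ∉ t_basket → item ∈ reversed_item_dict.map Prod.fst

instance (term_dict_false : List (Int × List (String × Int))) (semester : Int) (t_basket : List Int) (pred_basket : List Int) (reversed_item_dict : List (Int × String)) : Decidable (Pre_calculate_term_dict_false term_dict_false semester t_basket pred_basket reversed_item_dict) := by unfold Pre_calculate_term_dict_false; infer_instance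

def pvWitness_calculate_term_dict_false : (List (Int × List (String × Int))) × Int × List Int × List Int × (List (Int × String)) :=
  ([(1, [("calc", 2)])], 1, [5], [5, 7, 7], [(7, "algebra")])

def Spec_calculate_term_dict_false (term_dict_false : List (Int × List (String × Int))) (semester : Int) (t_basket : List Int) (pred_basket : List Int) (reversed_item_dict : List (Int × String)) (out : List (Int × List (String × Int))) : Prop := out = calculate_term_dict_false_alt term_dict_false semester t_basket pred_basket reversed_item_dict
instance (term_dict_false : List (Int × List (String × Int))) (semester : Int) (t_basket : List Int) (pred_basket : List Int) (reversed_item_dict : List (Int × String)) (out : List (Int × List (String × Int))) : Decidable (Spec_calculate_term_dict_false term_dict_false semester t_basket pred_basket reversed_item_dict out) := by unfold Spec_calculate_term_dict_false; infer_instance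

-- ===== CLAIM (what is proved, stated in full; the proofs are below) =====
def Claim_equal_calculate_term_dict_false : Prop := ∀ (term_dict_false : List (Int × List (String × Int))) (semester : Int) (t_basket : List Int) (pred_basket : List Int) (reversed_item_dict : List (Int × String)), Dom_calculate_term_dict_false term_dict_false semester t_basket pred_basket reversed_item_dict → Pre_calculate_term_dict_false term_dict_false semester t_basket pred_basket reversed_item_dict → Spec_calculate_term_dict_false term_dict_false semester t_basket pred_basket reversed_item_dict (calculate_term_dict_false term_dict_false semester t_basket pred_basket reversed_item_dict)

-- ===== LEMMAS AND PROOFS =====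
lemma pv_insert_comm_of_contains (cc : PySem.Dict String Int) (n k : String) (a b : Int)
    (hc : cc.contains n = true) (hne : n ≠ k) :
    (cc.insert k a).insert n b = (cc.insert n b).insert k a := by
  have hc1 : (cc.insert k a).contains n = true := by
    simp [PySem.Dict.contains_insert, hc]
  apply PySem.Dict.ext
  by_cases hk : cc.contains k = true
  · have hk1 : (cc.insert n b).contains k = true := by
      simp [PySem.Dict.contains_insert, hk]
    rw [PySem.Dict.items_insert_of_contains _ b hc1, PySem.Dict.items_insert_of_contains _ a hk,
        PySem.Dict.items_insert_of_contains _ a hk1, PySem.Dict.items_insert_of_contains _ b hc]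
    simp only [List.map_map]
    apply List.map_congr_left
    intro p _
    by_cases h1 : p.1 = k <;> by_cases h2 : p.1 = n <;>
      simp_all [Ne.symm hne]
  · have hk' : cc.contains k = false := by simpa using hk
    have hk1 : (cc.insert n b).contains k = false := by
      simp [PySem.Dict.contains_insert, hk', beq_eq_false_iff_ne.mpr (Ne.symm hne)]
    rw [PySem.Dict.items_insert_of_contains _ b hc1, PySem.Dict.items_insert_of_not_contains _ a hk',
        PySem.Dict.items_insert_of_not_contains _ a hk1, PySem.Dict.items_insert_of_contains _ b hc]
    simp only [List.map_append, List.map_cons, List.map_nil]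
    congr 1
    simp [beq_eq_false_iff_ne.mpr (Ne.symm hne)]


def pvBump (cc : PySem.Dict String Int) (n : String) : PySem.Dict String Int :=
  cc.insert n (cc.getD n 0 + 1)

def pvMerge (cc : PySem.Dict String Int) (p : String × Int) : PySem.Dict String Int :=
  cc.insert p.1 (cc.getD p.1 0 + p.2)

lemma pv_bump_foldl_merge (rest : List (String × Int)) (n : String) :
    ∀ (cc : PySem.Dict String Int), cc.contains n = true → n ∉ rest.map Prod.fst →
    pvBump (rest.foldl pvMerge cc) n = rest.foldl pvMerge (pvBump cc n) := by
  induction rest with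
  | nil => intro cc _ _; rfl
  | cons p rest ih =>
    intro cc hc hn
    obtain ⟨k, u⟩ := p
    simp only [List.map_cons, List.mem_cons, not_or] at hn
    obtain ⟨hkn, hrest⟩ := hn
    have hkn' : n ≠ k := hkn
    simp only [List.foldl_cons]
    have hc' : (pvMerge cc (k, u)).contains n = true := by
      simp [pvMerge, PySem.Dict.contains_insert, hc]
    rw [ih _ hc' hrest]
    congr 1
    show pvBump (cc.insert k (cc.getD k 0 + u)) n = pvMerge (pvBump cc n) (k, u)
    rw [pvBump, PySem.Dict.getD_insert_of_ne _ _ _ hkn',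
        pv_insert_comm_of_contains _ _ _ _ _ hc hkn']
    show _ = (pvBump cc n).insert k ((pvBump cc n).getD k 0 + u)
    rw [pvBump, PySem.Dict.getD_insert_of_ne _ _ _ (Ne.symm hkn')]


lemma pv_merge_replace (ws : List (String × Int)) :
    ∀ (cc : PySem.Dict String Int) (n : String) (v : Int), (ws.map Prod.fst).Nodup → (n, v) ∈ ws →
    (ws.map (fun p => if (p.1 == n) = true then (n, v + 1) else p)).foldl pvMerge cc
      = pvBump (ws.foldl pvMerge cc) n := by
  induction ws with
  | nil => intro _ _ _ _ h; simp at h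
  | cons p ws ih =>
    intro cc n v hnd hmem
    obtain ⟨k, u⟩ := p
    simp only [List.map_cons, List.nodup_cons] at hnd
    obtain ⟨hknotin, hnd'⟩ := hnd
    by_cases hk : k = n
    · subst hk
      -- head is the counted key; (k,v) must be the head, v = u
      have huv : v = u := by
        rcases List.mem_cons.mp hmem with h | h
        · exact congrArg Prod.snd h
        · exact absurd (List.mem_map.mpr ⟨(k, v), h, rfl⟩) hknotin
      subst huv
      have hrest : ∀ q ∈ ws, q.1 ≠ k := by
        intro q hq h
        exact hknotin (List.mem_map.mpr ⟨q, hq, h⟩)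
      simp only [List.map_cons, BEq.rfl, if_true]
      have hid : ws.map (fun p => if (p.1 == k) = true then (k, v + 1) else p) = ws := by
        apply List.map_congr_left ?_ |>.trans ws.map_id
        intro q hq
        simp [beq_eq_false_iff_ne.mpr (hrest q hq)]
      rw [hid]
      simp only [List.foldl_cons]
      have hc0 : (pvMerge cc (k, v)).contains k = true := by
        simp [pvMerge, PySem.Dict.contains_insert_self]
      have e1 : pvMerge cc (k, v + 1) = pvBump (pvMerge cc (k, v)) k := by
        show cc.insert k (cc.getD k 0 + (v + 1)) = pvBump (cc.insert k (cc.getD k 0 + v)) k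
        rw [pvBump, PySem.Dict.getD_insert_self, PySem.Dict.insert_insert_self, add_assoc]
      rw [e1, pv_bump_foldl_merge ws k (pvMerge cc (k, v)) hc0 hknotin]
    · have hmem' : (n, v) ∈ ws := by
        rcases List.mem_cons.mp hmem with h | h
        · cases h; exact absurd rfl hk
        · exact h
      simp only [List.map_cons, beq_eq_false_iff_ne.mpr hk, Bool.false_eq_true, if_false,
        List.foldl_cons]
      exact ih (pvMerge cc (k, u)) n v hnd' hmem'


lemma pv_merge_bumped (w : PySem.Dict String Int) (n : String) (cc : PySem.Dict String Int)
    (hnd : w.keys.Nodup) :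
    ((w.insert n (w.getD n 0 + 1)).items).foldl pvMerge cc = pvBump (w.items.foldl pvMerge cc) n := by
  by_cases hn : w.contains n = true
  · obtain ⟨v, hv⟩ : ∃ v, w.get? n = some v := by
      rcases h : w.get? n with _ | v
      · rw [PySem.Dict.get?_eq_none_iff_contains] at h
        rw [h] at hn; cases hn
      · exact ⟨v, rfl⟩
    have hmem : (n, v) ∈ w.items := PySem.Dict.mem_items_of_get?_eq_some _ hv
    have hgd : w.getD n 0 = v := PySem.Dict.getD_of_get?_eq_some _ _ hv
    rw [PySem.Dict.items_insert_of_contains _ _ hn, hgd]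
    exact pv_merge_replace w.items cc n v (by simpa [PySem.Dict.keys] using hnd) hmem
  · have hn' : w.contains n = false := by simpa using hn
    rw [PySem.Dict.items_insert_of_not_contains _ _ hn',
        PySem.Dict.getD_of_not_contains _ _ hn', List.foldl_append]
    show pvMerge _ (n, 0 + 1) = pvBump _ n
    rw [pvMerge, pvBump]
    norm_num


lemma pv_counter_merge (names : List String) :
    ∀ (cc : PySem.Dict String Int), ((PySem.Dict.counter names).items).foldl pvMerge cc = names.foldl pvBump cc := by
  induction names using List.reverseRecOn with
  | nil => intro cc; rfl
  | append_singleton xs x ih =>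
    intro cc
    rw [PySem.Dict.counter_append_singleton, List.foldl_append]
    show ((((PySem.Dict.counter xs)).insert x ((PySem.Dict.counter xs).getD x 0 + 1)).items).foldl pvMerge cc = pvBump (xs.foldl pvBump cc) x
    rw [pv_merge_bumped _ _ _ (PySem.Dict.nodup_keys_counter xs), ih]


def pvNames (t_basket pred_basket : List Int) (rid : PySem.Dict Int String) : List String :=
  (pred_basket.filter (fun i => !(t_basket.contains i))).map (fun i => (rid.get? i).getD "")

lemma pv_A_norm (semester : Int) (t_basket : List Int) (rid : PySem.Dict Int String)
    (L : List Int) :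
    ∀ (d : PySem.Dict Int (PySem.Dict String Int)),
    (∀ item ∈ L, item ∉ t_basket → (rid.get? item).isSome) →
    L.foldl (fun d item =>
      if t_basket.contains item then d
      else
        let count_course := if d.contains semester = false then PySem.Dict.empty
                            else (d.get? semester).getD PySem.Dict.empty
        match rid.get? item with
        | none => d
        | some name =>
          let count_course := if count_course.contains name = false then count_course.insert name 1
                              else count_course.insert name (count_course.getD name 0 + 1)
          d.insert semester count_course) d
    = (if pvNames t_basket L rid = [] then d
       else d.insert semester ((pvNames t_basket L rid).foldl pvBump ((d.get? semester).getD PySem.Dict.empty))) := by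
  induction L with
  | nil => intro d _; simp [pvNames]
  | cons item L ih =>
    intro d hpre
    have hpre' : ∀ i ∈ L, i ∉ t_basket → (rid.get? i).isSome := fun i hi => hpre i (List.mem_cons_of_mem _ hi)
    by_cases ht : t_basket.contains item = true
    · have hmemT : item ∈ t_basket := by simpa using ht
      have hnm : pvNames t_basket (item :: L) rid = pvNames t_basket L rid := by
        simp [pvNames, hmemT]
      simp only [List.foldl_cons, if_pos ht, hnm]
      exact ih d hpre'
    · have ht' : t_basket.contains item = false := by simpa using ht
      have hmem : item ∉ t_basket := by simpa using ht'
      obtain ⟨name, hname⟩ := Option.isSome_iff_exists.mp (hpre item List.mem_cons_self hmem)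
      have hnm : pvNames t_basket (item :: L) rid = name :: pvNames t_basket L rid := by
        simp [pvNames, hmem, hname]
      have hcc0 : (if d.contains semester = false then PySem.Dict.empty
                   else (d.get? semester).getD PySem.Dict.empty) = (d.get? semester).getD PySem.Dict.empty := by
        by_cases hs : d.contains semester = true
        · simp [hs]
        · have hs' : d.contains semester = false := by simpa using hs
          have h0 : d.get? semester = none := (PySem.Dict.get?_eq_none_iff_contains _ _).mpr hs'
          simp [hs', h0]
      have hbump : ∀ cc : PySem.Dict String Int,
          (if cc.contains name = false then cc.insert name 1
           else cc.insert name (cc.getD name 0 + 1)) = pvBump cc name := by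
        intro cc
        by_cases hc : cc.contains name = true
        · simp [hc, pvBump]
        · have hc' : cc.contains name = false := by simpa using hc
          rw [pvBump, PySem.Dict.getD_of_not_contains _ _ hc']
          norm_num [hc']
      simp only [List.foldl_cons, if_neg ht, hname, hcc0, hbump]
      rw [ih _ hpre', hnm]
      by_cases hL : pvNames t_basket L rid = []
      · simp [hL]
      · rw [if_neg hL, if_neg (List.cons_ne_nil _ _), List.foldl_cons,
            PySem.Dict.get?_insert_self, Option.getD_some, PySem.Dict.insert_insert_self]


lemma pv_unwrap_wrap (l : List (Int × List (String × Int))) : pvUnwrap (pvWrap l) = l := by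
  simp only [pvUnwrap, pvWrap, List.map_map]
  exact (List.map_congr_left (fun p _ => rfl)).trans (List.map_id l)


-- B's one-pass counter loop builds exactly Counter(pvNames …)
lemma pv_B_wrong (t_basket pred_basket : List Int) (rid : PySem.Dict Int String) :
    pred_basket.foldl (fun w item =>
      if PySem.Set.contains (PySem.Set.ofList t_basket) item then w
      else
        let name := (rid.get? item).getD ""
        w.insert name (w.getD name 0 + 1)) PySem.Dict.empty
    = PySem.Dict.counter (pvNames t_basket pred_basket rid) := by
  have hset : ∀ item : Int, PySem.Set.contains (PySem.Set.ofList t_basket) item = t_basket.contains item := by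
    intro item
    simp [PySem.Set.contains, PySem.Set.mem_ofList]
  calc pred_basket.foldl (fun w item =>
      if PySem.Set.contains (PySem.Set.ofList t_basket) item then w
      else (let name := (rid.get? item).getD ""; w.insert name (w.getD name 0 + 1))) PySem.Dict.empty
      = pred_basket.foldl (fun w item =>
        if (!(t_basket.contains item)) = true
        then (let name := (rid.get? item).getD ""; w.insert name (w.getD name 0 + 1)) else w) PySem.Dict.empty := by
        apply PySem.List.foldl_congr_mem
        intro w item _
        rw [hset]
        by_cases h : t_basket.contains item = true <;> simp
    _ = PySem.Dict.counter (pvNames t_basket pred_basket rid) := by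
        rw [PySem.List.foldl_if_eq_foldl_filter, ← PySem.Dict.foldl_insert_getD_add_one_eq_counter,
          pvNames, List.foldl_map]

lemma pv_counter_items_ne_nil (names : List String) (h : names ≠ []) :
    (PySem.Dict.counter names).items ≠ [] := by
  cases names with
  | nil => exact absurd rfl h
  | cons n ns =>
    intro hit
    have h1 : (PySem.Dict.counter (n :: ns)).getD n 0 = ((n :: ns).count n : Int) :=
      PySem.Dict.getD_counter _ _
    have h2 : (PySem.Dict.counter (n :: ns)).getD n 0 = 0 := by
      have : PySem.Dict.counter (n :: ns) = PySem.Dict.mk [] := PySem.Dict.ext hit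
      rw [this]
      rfl
    rw [h2, List.count_cons_self] at h1
    push_cast at h1
    omega


lemma pv_main_equal (term_dict_false : List (Int × List (String × Int))) (semester : Int) (t_basket : List Int) (pred_basket : List Int) (reversed_item_dict : List (Int × String))
    (hpre : ∀ item ∈ pred_basket, item ∉ t_basket → item ∈ reversed_item_dict.map Prod.fst) :
    calculate_term_dict_false term_dict_false semester t_basket pred_basket reversed_item_dict
      = calculate_term_dict_false_alt term_dict_false semester t_basket pred_basket reversed_item_dict := by
  have hpre' : ∀ item ∈ pred_basket, item ∉ t_basket → ((PySem.Dict.mk reversed_item_dict).get? item).isSome := by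
    intro item hi hn
    rcases h : (PySem.Dict.mk reversed_item_dict).get? item with _ | v
    · rw [PySem.Dict.get?_eq_none_iff_not_mem_keys] at h
      exact absurd (by simpa [PySem.Dict.keys_mk] using hpre item hi hn) h
    · rfl
  unfold calculate_term_dict_false calculate_term_dict_false_alt
  simp only [pv_B_wrong, pv_A_norm semester t_basket (PySem.Dict.mk reversed_item_dict) pred_basket (pvWrap term_dict_false) hpre']
  by_cases hL : pvNames t_basket pred_basket (PySem.Dict.mk reversed_item_dict) = []
  · rw [if_pos hL, if_pos (by rw [hL]; rfl), pv_unwrap_wrap]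
  · rw [if_neg hL, if_neg (pv_counter_items_ne_nil _ hL)]
    have hm : (fun (cc : PySem.Dict String Int) (p : String × Int) => cc.insert p.1 (cc.getD p.1 0 + p.2)) = pvMerge := rfl
    rw [hm, pv_counter_merge]

-- ===== VERDICT (by name: the statement is the Claim_ definition above) =====
theorem calculate_term_dict_false_spec : Claim_equal_calculate_term_dict_false := by
  intro term_dict_false semester t_basket pred_basket reversed_item_dict _ hpre
  exact pv_main_equal term_dict_false semester t_basket pred_basket reversed_item_dict hpre
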